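-- pv_equiv track=rewrite | github.com/Jjiggu/Programmers | 프로그래머스/0/120869. 외계어 사전/외계어 사전.py | solution
-- ===== SOURCE A (Python) =====
-- def solution(spell, dic):
--     # 단어가 존재하면 1, 단어가 존재하지 않으면 2
--     result = []
--     answer = 0
--
--     for word in dic:
--         if len(spell) == len(word):
--                 result.append(word)
--     for word in result:
--         cnt = 0
--         for sp in spell:
--             if sp in word:
--                 cnt+=1
--         if cnt == len(spell):
--             answer += 1
--
--     if answer == 0:
--         return 2
--     else:
--         return 1
-- ===== SOURCE B (Python) =====
-- def solution(spell, dic):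
--     # Successive refinement: keep a candidate list, narrow it by one spell letter at a time.
--     candidates = [w for w in dic if len(w) == len(spell)]
--     for sp in spell:
--         candidates = [w for w in candidates if sp in w]
--     return 1 if candidates else 2
-- ===== Notes on version B (the rewrite author's own statement) =====
-- stated objective: alternative
-- what changed: Inverts the loop nesting: instead of scanning dic word by word and counting spell hits per word, B keeps a shrinking candidate list and refines it once per spell element (successive filtering), answering by whether any candidate survives.
import Mathlib
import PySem

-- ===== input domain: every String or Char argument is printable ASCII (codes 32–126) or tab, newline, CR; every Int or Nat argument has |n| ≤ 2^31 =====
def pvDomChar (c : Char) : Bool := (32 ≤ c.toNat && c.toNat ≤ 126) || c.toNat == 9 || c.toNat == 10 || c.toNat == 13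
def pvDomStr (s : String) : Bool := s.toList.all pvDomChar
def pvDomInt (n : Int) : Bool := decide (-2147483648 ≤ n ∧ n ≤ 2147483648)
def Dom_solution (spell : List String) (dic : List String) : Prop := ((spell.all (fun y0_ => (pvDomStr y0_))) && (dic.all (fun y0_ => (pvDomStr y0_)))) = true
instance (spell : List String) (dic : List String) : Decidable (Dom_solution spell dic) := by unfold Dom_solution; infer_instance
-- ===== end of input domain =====

-- B inverts the loop nesting: a shrinking candidate list refined once per spell element
-- (successive filtering), instead of A's per-word counter over spell; same cost, alternative structure.

-- ===== PORT A =====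
def solution (spell : List String) (dic : List String) : Int :=
  let result : List String :=
    dic.foldl (fun acc word =>
      if (spell.length : Int) = PySem.Str.len word then acc ++ [word] else acc) []
  let answer : Int :=
    result.foldl (fun answer word =>
      let cnt : Int :=
        spell.foldl (fun cnt sp => if PySem.Str.isIn sp word then cnt + 1 else cnt) 0
      if cnt = (spell.length : Int) then answer + 1 else answer) 0
  if answer = 0 then 2 else 1

-- ===== PORT B =====
def solution_alt (spell : List String) (dic : List String) : Int :=
  let candidates0 : List String := dic.filter (fun w => PySem.Str.len w = (spell.length : Int))
  let candidates : List String :=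
    spell.foldl (fun cs sp => cs.filter (fun w => PySem.Str.isIn sp w)) candidates0
  if candidates.isEmpty then 2 else 1

-- ===== PRECONDITION & SPEC =====
def Spec_solution (spell : List String) (dic : List String) (out : Int) : Prop := out = solution_alt spell dic
instance (spell : List String) (dic : List String) (out : Int) : Decidable (Spec_solution spell dic out) := by unfold Spec_solution; infer_instance

-- ===== CLAIM =====
def Claim_equal_solution : Prop := ∀ (spell : List String) (dic : List String), Dom_solution spell dic → Spec_solution spell dic (solution spell dic)

-- ===== LEMMAS AND PROOFS =====

-- B's refinement loop collapses to one filter with an 'all' predicate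
theorem pv_foldl_filter (spell : List String) (init : List String) :
    spell.foldl (fun cs sp => cs.filter (fun w => PySem.Str.isIn sp w)) init
      = init.filter (fun w => spell.all (fun sp => PySem.Str.isIn sp w)) := by
  induction spell generalizing init with
  | nil => simp
  | cons sp rest ih =>
    simp only [List.foldl_cons, ih, List.filter_filter, List.all_cons]
    congr 1
    funext w
    exact Bool.and_comm _ _

-- A's inner counter hits len(spell) iff every spell element occurs in the word
theorem pv_cnt_iff (spell : List String) (word : String) :
    ((spell.countP (fun sp => PySem.Str.isIn sp word) : Int) = (spell.length : Int)) ↔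
    (spell.all (fun sp => PySem.Str.isIn sp word) = true) := by
  rw [Int.natCast_inj, List.countP_eq_length, List.all_eq_true]

-- ===== VERDICT =====
theorem solution_spec : Claim_equal_solution := by
  intro spell dic _
  show solution spell dic = solution_alt spell dic
  unfold solution solution_alt
  simp only [PySem.List.foldl_append_ite_eq_filter, PySem.List.foldl_if_add_one,
    PySem.List.foldl_ite_add_one, List.nil_append, zero_add, pv_foldl_filter]
  rw [List.countP_eq_length_filter, List.filter_filter]
  have hpe : List.filter (fun a =>
        decide ((spell.countP (fun x => PySem.Str.isIn x a) : Int) = (spell.length : Int)) &&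
        decide ((spell.length : Int) = PySem.Str.len a)) dic
      = List.filter (fun w => spell.all fun sp => PySem.Str.isIn sp w)
          (List.filter (fun w => decide (PySem.Str.len w = (spell.length : Int))) dic) := by
    rw [List.filter_filter]
    apply List.filter_congr
    intro w _
    rw [Bool.eq_iff_iff]
    simp only [Bool.and_eq_true, decide_eq_true_eq]
    rw [pv_cnt_iff spell w]
    constructor
    · exact fun ⟨h1, h2⟩ => ⟨h1, h2.symm⟩
    · exact fun ⟨h1, h2⟩ => ⟨h1, h2.symm⟩
  rw [hpe]
  rcases List.filter (fun w => spell.all fun sp => PySem.Str.isIn sp w)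
      (List.filter (fun w => decide (PySem.Str.len w = (spell.length : Int))) dic) with _ | ⟨x, xs⟩ <;> simp <;> omega
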